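-- pv_equiv track=rewrite | github.com/Remag29/AdventOfCode | 2023/14/part2.py | roll_V3
-- ===== SOURCE A (Python) =====
-- def roll_V3(lines, reverse_bool):
--     tilted = []
--     for row in lines:
--         row_split = [
--             sorted(fragment, reverse=reverse_bool) for fragment in row.split('#')
--         ]
--         row_combined = "#".join("".join(fragment) for fragment in row_split)
--         tilted.append(row_combined)
--     return tuple(tilted)
-- ===== SOURCE B (Python) =====
-- # B: counting sort per fragment — one pass counts each character's occurrences,
-- # then only the distinct characters are ordered and each is emitted count times,
-- # instead of comparison-sorting the whole fragment.
-- def sort_fragment(fragment, reverse_bool):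
--     counts = {}
--     for ch in fragment:
--         counts[ch] = counts.get(ch, 0) + 1
--     return ''.join(ch * counts[ch] for ch in sorted(counts, reverse=reverse_bool))
--
--
-- def roll_V3(lines, reverse_bool):
--     return tuple(
--         '#'.join(sort_fragment(fragment, reverse_bool) for fragment in row.split('#'))
--         for row in lines
--     )
-- ===== Notes on version B (the rewrite author's own statement) =====
-- stated objective: alternative
-- what changed: Each '#'-fragment is rebuilt by a counting sort — one pass counts each character's occurrences in a dict, then only the distinct characters are ordered and each is emitted count times — instead of comparison-sorting every fragment; the outer loop becomes a comprehension.
import Mathlib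
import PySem

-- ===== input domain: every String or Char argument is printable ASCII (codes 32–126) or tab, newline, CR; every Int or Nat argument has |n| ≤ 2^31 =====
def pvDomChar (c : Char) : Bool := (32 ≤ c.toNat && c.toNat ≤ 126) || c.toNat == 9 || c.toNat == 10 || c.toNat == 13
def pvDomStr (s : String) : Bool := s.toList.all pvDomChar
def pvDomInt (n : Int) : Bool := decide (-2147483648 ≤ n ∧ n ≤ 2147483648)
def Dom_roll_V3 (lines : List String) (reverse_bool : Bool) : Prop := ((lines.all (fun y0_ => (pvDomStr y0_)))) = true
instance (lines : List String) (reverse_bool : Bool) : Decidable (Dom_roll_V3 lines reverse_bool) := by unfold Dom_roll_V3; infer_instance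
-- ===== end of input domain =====

-- B replaces the per-fragment comparison sort by a counting sort (one pass counts
-- each character, then the distinct characters are ordered and emitted count times);
-- same return value, alternative algorithm.
-- (A returns a Python tuple; under the type convention both ports return List String.)

-- ===== PORT A =====
def roll_V3 (lines : List String) (reverse_bool : Bool) : List String :=
  lines.foldl (fun tilted row =>
    let row_split := (PySem.Chars.splitOn row.toList ['#']).map
      (fun fragment => PySem.List.sorted fragment (fun c => c) reverse_bool)
    let row_combined := PySem.Chars.join ['#'] row_split
    tilted ++ [String.mk row_combined]) []

-- ===== PORT B =====
def sortFragment (fragment : List Char) (reverse_bool : Bool) : List Char :=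
  let counts := fragment.foldl (fun d ch => d.insert ch (d.getD ch 0 + 1))
    (PySem.Dict.empty : PySem.Dict Char Int)
  (PySem.List.sorted counts.keys (fun c => c) reverse_bool).flatMap
    (fun ch => List.replicate (counts.getD ch 0).toNat ch)

def roll_V3_alt (lines : List String) (reverse_bool : Bool) : List String :=
  lines.map (fun row =>
    String.mk (PySem.Chars.join ['#']
      ((PySem.Chars.splitOn row.toList ['#']).map
        (fun fragment => sortFragment fragment reverse_bool))))

-- ===== PRECONDITION & SPEC =====
def Spec_roll_V3 (lines : List String) (reverse_bool : Bool) (out : List String) : Prop := out = roll_V3_alt lines reverse_bool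
instance (lines : List String) (reverse_bool : Bool) (out : List String) : Decidable (Spec_roll_V3 lines reverse_bool out) := by unfold Spec_roll_V3; infer_instance

-- ===== CLAIM (what is proved, stated in full; the proofs are below) =====
def Claim_equal_roll_V3 : Prop := ∀ (lines : List String) (reverse_bool : Bool), Dom_roll_V3 lines reverse_bool → Spec_roll_V3 lines reverse_bool (roll_V3 lines reverse_bool)

-- ===== LEMMAS AND PROOFS =====

-- counting the emission of a Nodup key list
lemma count_flat_replicate (f : Char → Nat) :
    ∀ (K : List Char), K.Nodup → ∀ (a : Char),
      List.count a (K.flatMap (fun c => List.replicate (f c) c)) = if a ∈ K then f a else 0 := by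
  intro K
  induction K with
  | nil => intro _ a; simp
  | cons c t ih =>
    intro hnd a
    have hnd' := hnd
    rw [List.nodup_cons] at hnd'
    rw [List.flatMap_cons, List.count_append, ih hnd'.2 a, List.count_replicate]
    by_cases hca : c = a
    · subst hca
      rw [if_pos (List.mem_cons_self), if_neg hnd'.1]
      simp
    · have : (c == a) = false := beq_eq_false_iff_ne.mpr hca
      rw [this]
      by_cases hat : a ∈ t
      · rw [if_pos hat, if_pos (List.mem_cons_of_mem _ hat)]; simp
      · rw [if_neg hat, if_neg (show a ∉ c :: t by
          intro h
          rcases List.mem_cons.mp h with h | h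
          · exact hca h.symm
          · exact hat h)]
        simp

-- pairwise order of the emission, inherited from the key list
lemma pairwise_flat_replicate (f : Char → Nat) (S : Char → Char → Prop)
    (hrefl : ∀ c, S c c) :
    ∀ (K : List Char), K.Pairwise S →
      List.Pairwise S (K.flatMap (fun c => List.replicate (f c) c)) := by
  intro K
  induction K with
  | nil => intro _; simp
  | cons c t ih =>
    intro hp
    rw [List.pairwise_cons] at hp
    rw [List.flatMap_cons, List.pairwise_append]
    refine ⟨?_, ih hp.2, ?_⟩
    · rw [List.pairwise_replicate]; right; exact hrefl c
    · intro a ha b hb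
      rw [List.eq_of_mem_replicate ha]
      rw [List.mem_flatMap] at hb
      rcases hb with ⟨d, hd, hbd⟩
      rw [List.eq_of_mem_replicate hbd]
      exact hp.1 d hd

-- the emission is a permutation of the original list
lemma perm_flat_replicate (cs : List Char) (rev : Bool) :
    ((PySem.List.sorted (PySem.Set.ofList cs) (fun c => c) rev).flatMap
      (fun c => List.replicate (cs.count c) c)).Perm cs := by
  apply List.perm_iff_count.mpr
  intro a
  have hnd : (PySem.List.sorted (PySem.Set.ofList cs) (fun c => c) rev).Nodup :=
    (PySem.List.sorted_perm (PySem.Set.ofList cs) (fun c => c) rev).symm.nodup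
      (PySem.Set.nodup_ofList cs)
  rw [count_flat_replicate (fun c => cs.count c) _ hnd a]
  by_cases ha : a ∈ cs
  · rw [if_pos (by rw [PySem.List.mem_sorted, PySem.Set.mem_ofList]; exact ha)]
  · rw [if_neg (by rw [PySem.List.mem_sorted, PySem.Set.mem_ofList]; exact ha)]
    symm
    exact List.count_eq_zero.mpr ha

-- core: Python's stable sort of a character list is exactly the counting-sort emission
lemma sorted_eq_emit_keys (cs : List Char) (rev : Bool) :
    PySem.List.sorted cs (fun c => c) rev =
      (PySem.List.sorted (PySem.Set.ofList cs) (fun c => c) rev).flatMap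
        (fun c => List.replicate (cs.count c) c) := by
  cases rev with
  | false =>
    apply List.Perm.eq_of_pairwise (le := (· ≤ ·))
    · intro a b _ _ h1 h2; exact le_antisymm h1 h2
    · exact PySem.List.sorted_pairwise cs (fun c => c)
    · exact pairwise_flat_replicate _ _ (fun c => le_refl c) _
        (PySem.List.sorted_pairwise (PySem.Set.ofList cs) (fun c => c))
    · exact (PySem.List.sorted_perm cs (fun c => c) false).trans
        (perm_flat_replicate cs false).symm
  | true =>
    apply List.Perm.eq_of_pairwise (le := fun a b => b ≤ a)
    · intro a b _ _ h1 h2; exact le_antisymm h2 h1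
    · exact PySem.List.sorted_pairwise_rev cs (fun c => c)
    · exact pairwise_flat_replicate _ (fun a b => b ≤ a) (fun c => le_refl c) _
        (PySem.List.sorted_pairwise_rev (PySem.Set.ofList cs) (fun c => c))
    · exact (PySem.List.sorted_perm cs (fun c => c) true).trans
        (perm_flat_replicate cs true).symm

-- B's per-fragment routine computes that emission
lemma sortFragment_eq (fragment : List Char) (rev : Bool) :
    sortFragment fragment rev =
      (PySem.List.sorted (PySem.Set.ofList fragment) (fun c => c) rev).flatMap
        (fun c => List.replicate (fragment.count c) c) := by
  simp only [sortFragment, PySem.Dict.foldl_insert_getD_add_one_eq_counter,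
    PySem.Dict.keys_counter, PySem.Dict.getD_counter, Int.toNat_natCast]

lemma pvFlatMap_singleton {A B : Type} (f : A → B) : ∀ l : List A,
    l.flatMap (fun x => [f x]) = l.map f
  | [] => rfl
  | a :: t => by simp [pvFlatMap_singleton f t]

-- ===== VERDICT (by name: the statement is the Claim_ definition above) =====
theorem roll_V3_spec : Claim_equal_roll_V3 := by
  intro lines reverse_bool _
  unfold Spec_roll_V3 roll_V3 roll_V3_alt
  rw [PySem.List.foldl_append_eq_flatMap
    (fun row => [String.mk (PySem.Chars.join ['#']
      ((PySem.Chars.splitOn row.toList ['#']).map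
        (fun fragment => PySem.List.sorted fragment (fun c => c) reverse_bool)))]) lines []]
  rw [List.nil_append]
  rw [show (lines.flatMap (fun row => [String.mk (PySem.Chars.join ['#']
      ((PySem.Chars.splitOn row.toList ['#']).map
        (fun fragment => PySem.List.sorted fragment (fun c => c) reverse_bool)))])) =
    lines.map (fun row => String.mk (PySem.Chars.join ['#']
      ((PySem.Chars.splitOn row.toList ['#']).map
        (fun fragment => PySem.List.sorted fragment (fun c => c) reverse_bool)))) from
    pvFlatMap_singleton _ lines]
  apply List.map_congr_left
  intro row _
  congr 1
  congr 1
  apply List.map_congr_left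
  intro fragment _
  rw [sortFragment_eq fragment reverse_bool, sorted_eq_emit_keys fragment reverse_bool]
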